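-- pv_equiv track=rewrite | github.com/pypi-data/pypi-mirror-373 | packages/factorysimpy/factorysimpy-0.1.0b3-py3-none-any.whl/factorysimpy/base/slotted_belt_store.py | _has_consecutive_items
-- ===== SOURCE A (Python) =====
-- def _has_consecutive_items(pattern):
--     """
--     Check if the pattern has consecutive items (no gaps between items).
--     """
--     item_positions = [i for i, char in enumerate(pattern) if char == '*']
--
--     if len(item_positions) <= 1:
--         return True
--
--     # Check if positions are consecutive
--     for i in range(1, len(item_positions)):
--         if item_positions[i] - item_positions[i-1] > 1:
--             return False
--
--     return True
-- ===== SOURCE B (Python) =====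
-- def _has_consecutive_items(pattern):
--     count = pattern.count('*')
--     if count <= 1:
--         return True
--     return pattern.rfind('*') - pattern.find('*') + 1 == count
-- ===== Notes on version B (the rewrite author's own statement) =====
-- stated objective: simpler
-- what changed: Replaced the explicit list of star positions and the pairwise gap-checking loop with a closed-form span-equals-count test (rfind - find + 1 == count) over built-in scans.
import Mathlib
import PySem

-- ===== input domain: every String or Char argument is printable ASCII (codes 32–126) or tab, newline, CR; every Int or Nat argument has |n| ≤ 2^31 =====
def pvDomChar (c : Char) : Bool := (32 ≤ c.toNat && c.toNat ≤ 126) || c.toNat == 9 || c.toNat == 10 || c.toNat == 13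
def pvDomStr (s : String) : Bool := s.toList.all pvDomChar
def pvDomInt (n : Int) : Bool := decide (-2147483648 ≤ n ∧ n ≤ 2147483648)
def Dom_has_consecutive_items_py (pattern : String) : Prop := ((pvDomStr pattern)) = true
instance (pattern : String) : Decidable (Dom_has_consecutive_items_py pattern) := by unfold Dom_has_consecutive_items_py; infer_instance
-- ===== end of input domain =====

-- B replaces A's star-position list and pairwise gap loop with a span-equals-count test; objective: simpler.

-- ===== PORT A =====
-- the 'for i in range(1, len(ps))' loop with early 'return False': checks each adjacent pair in order
def pvCheckGaps : List Int → Bool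
  | a :: b :: rest => if b - a > 1 then false else pvCheckGaps (b :: rest)
  | _ => true

def has_consecutive_items_py (pattern : String) : Bool :=
  let item_positions : List Int :=
    ((PySem.List.enumerate pattern.toList 0).filter (fun p => p.2 == '*')).map (·.1)
  if item_positions.length ≤ 1 then true
  else pvCheckGaps item_positions

-- ===== PORT B =====
def has_consecutive_items_py_alt (pattern : String) : Bool :=
  let count := PySem.Str.count pattern "*"
  if count ≤ 1 then true
  else PySem.Str.rfind pattern "*" - PySem.Str.find pattern "*" + 1 == (count : Int)

-- ===== PRECONDITION & SPEC =====
def Spec_has_consecutive_items_py (pattern : String) (out : Bool) : Prop := out = has_consecutive_items_py_alt pattern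
instance (pattern : String) (out : Bool) : Decidable (Spec_has_consecutive_items_py pattern out) := by unfold Spec_has_consecutive_items_py; infer_instance

-- ===== CLAIM (what is proved, stated in full; the proofs are below) =====
def Claim_equal_has_consecutive_items_py : Prop := ∀ (pattern : String), Dom_has_consecutive_items_py pattern → Spec_has_consecutive_items_py pattern (has_consecutive_items_py pattern)

-- ===== LEMMAS AND PROOFS =====

/-- the list of indices (from start `k`) at which `'*'` occurs -/
def pvPosFrom (k : Int) : List Char → List Int
  | [] => []
  | c :: t => if c = '*' then k :: pvPosFrom (k + 1) t else pvPosFrom (k + 1) t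

theorem pvStars_eq (l : List Char) (k : Int) :
    ((PySem.List.enumerate l k).filter (fun p => p.2 == '*')).map (·.1) = pvPosFrom k l := by
  induction l generalizing k with
  | nil => simp [PySem.List.enumerate_nil, pvPosFrom]
  | cons c t ih =>
    simp only [PySem.List.enumerate_cons, List.filter_cons, pvPosFrom]
    by_cases h : c = '*' <;> simp [h, ih]

theorem pvPosFrom_length (l : List Char) (k : Int) :
    (pvPosFrom k l).length = l.count '*' := by
  induction l generalizing k with
  | nil => simp [pvPosFrom]
  | cons c t ih =>
    by_cases h : c = '*' <;> simp [pvPosFrom, h, ih]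

theorem pvPosFrom_ge (l : List Char) (k : Int) : ∀ x ∈ pvPosFrom k l, k ≤ x := by
  induction l generalizing k with
  | nil => simp [pvPosFrom]
  | cons c t ih =>
    intro x hx
    by_cases h : c = '*' <;> simp only [pvPosFrom, h, if_true, if_false, List.mem_cons] at hx
    · rcases hx with rfl | hx
      · exact le_refl _
      · have := ih (k + 1) x hx; omega
    · have := ih (k + 1) x hx; omega

theorem pvPosFrom_chain (l : List Char) (k : Int) : (pvPosFrom k l).IsChain (· < ·) := by
  induction l generalizing k with
  | nil => simp [pvPosFrom]
  | cons c t ih =>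
    by_cases h : c = '*' <;> simp only [pvPosFrom, h, if_true, if_false]
    · refine (ih (k + 1)).cons ?_
      intro y hy
      have := pvPosFrom_ge t (k + 1) y (List.mem_of_mem_head? hy)
      omega
    · exact ih (k + 1)

theorem pvPosFrom_append (xs ys : List Char) (k : Int) :
    pvPosFrom k (xs ++ ys) = pvPosFrom k xs ++ pvPosFrom (k + xs.length) ys := by
  induction xs generalizing k with
  | nil => simp [pvPosFrom]
  | cons c t ih =>
    by_cases h : c = '*' <;> simp [pvPosFrom, h, ih] <;> ring_nf

-- single-char prefix test
theorem pvIsPrefix_star (l : List Char) :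
    (List.isPrefixOf ['*'] l) = (match l with | [] => false | c :: _ => decide (c = '*')) := by
  cases l with
  | nil => simp [List.isPrefixOf]
  | cons c t =>
    by_cases h : c = '*'
    · simp [List.isPrefixOf, h]
    · simp only [List.isPrefixOf, List.isPrefixOf_nil_left, Bool.and_true, h, decide_false]
      exact beq_eq_false_iff_ne.mpr (fun e => h (Eq.symm e))

theorem pvCount_go (l : List Char) (acc : Nat) :
    PySem.Chars.count.go ['*'] l.length l acc = acc + l.count '*' := by
  induction l generalizing acc with
  | nil => simp [PySem.Chars.count.go]
  | cons c t ih =>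
    rw [show (c :: t).length = t.length + 1 from rfl]
    rw [PySem.Chars.count.go]
    by_cases h : c = '*'
    · simp only [pvIsPrefix_star, h, decide_true, if_true]
      simp [ih, List.count_cons, h]
      omega
    · simp only [pvIsPrefix_star, h, decide_false, if_false]
      simp [ih, List.count_cons, h]

theorem pvCount_eq (l : List Char) : PySem.Chars.count l ['*'] = l.count '*' := by
  simpa [PySem.Chars.count] using pvCount_go l 0

theorem pvFind_go (l : List Char) (k : Nat) :
    PySem.Chars.find.go ['*'] l k = (pvPosFrom (k : Int) l).headD (-1) := by
  induction l generalizing k with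
  | nil => simp [PySem.Chars.find.go, pvPosFrom]
  | cons c t ih =>
    rw [PySem.Chars.find.go]
    by_cases h : c = '*'
    · simp [pvIsPrefix_star, h, pvPosFrom]
    · have := ih (k + 1)
      simp only [pvIsPrefix_star, h, decide_false, if_false, pvPosFrom]
      rw [this]
      norm_cast

theorem pvRfind_go (l : List Char) (j : Nat) :
    PySem.Chars.rfind.go l ['*'] j = (pvPosFrom 0 (l.take (j + 1))).getLastD (-1) := by
  induction j with
  | zero =>
    rw [PySem.Chars.rfind.go]
    cases l with
    | nil => simp [pvIsPrefix_star, pvPosFrom]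
    | cons c t =>
      by_cases h : c = '*' <;> simp [pvIsPrefix_star, h, pvPosFrom]
  | succ j ih =>
    rw [PySem.Chars.rfind.go]
    rw [show l.take (j + 1 + 1) = l.take (j + 1) ++ (l[j+1]?.toList) from List.take_succ]
    by_cases hj : j + 1 < l.length
    · have hget : l[j+1]? = some l[j+1] := List.getElem?_eq_getElem hj
      have hdrop : List.drop (j + 1) l = l[j+1] :: List.drop (j + 2) l := by
        rw [List.drop_eq_getElem_cons hj]
      by_cases h : l[j+1] = '*'
      · rw [hdrop, pvIsPrefix_star]
        simp only [h, decide_true, if_true]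
        rw [hget, pvPosFrom_append]
        have hlen : (l.take (j + 1)).length = j + 1 := List.length_take_of_le (by omega)
        simp [pvPosFrom, hlen, h]
      · rw [hdrop, pvIsPrefix_star]
        simp only [h, decide_false, if_false]
        rw [hget, pvPosFrom_append]
        simp [pvPosFrom, h, ih]
    · have hget : l[j+1]? = none := List.getElem?_eq_none (by omega)
      have hdrop : List.drop (j + 1) l = [] := List.drop_eq_nil_of_le (by omega)
      rw [hdrop, pvIsPrefix_star, hget]
      simp [ih]

theorem pvLast_ge (t : List Int) (b : Int) (h : (b :: t).IsChain (· < ·)) :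
    b + (t.length : Int) ≤ (b :: t).getLastD (-1) := by
  induction t generalizing b with
  | nil => simp
  | cons x s ih =>
    have hbx : b < x := (List.isChain_cons_cons.mp h).1
    have := ih x (List.isChain_cons_cons.mp h).2
    simp only [List.getLastD_cons, List.length_cons] at *
    omega

theorem pvGetLastD_indep (t : List Int) (b x y : Int) :
    (b :: t).getLastD x = (b :: t).getLastD y := by
  induction t generalizing b with
  | nil => simp
  | cons c s ih => simpa only [List.getLastD_cons] using ih c

-- the gap loop on a strictly increasing list is the span test
theorem pvGap (rest : List Int) (a : Int) (h : (a :: rest).IsChain (· < ·)) :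
    pvCheckGaps (a :: rest) = decide ((a :: rest).getLastD (-1) = a + rest.length) := by
  induction rest generalizing a with
  | nil => simp [pvCheckGaps]
  | cons b t ih =>
    have hab : a < b := (List.isChain_cons_cons.mp h).1
    have hbt : (b :: t).IsChain (· < ·) := (List.isChain_cons_cons.mp h).2
    rw [show pvCheckGaps (a :: b :: t) = if b - a > 1 then false else pvCheckGaps (b :: t) from rfl]
    rw [show (a :: b :: t).getLastD (-1) = (b :: t).getLastD a from List.getLastD_cons ..]
    rw [pvGetLastD_indep t b a (-1)]
    by_cases hgap : b - a > 1
    · have hlast := pvLast_ge t b hbt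
      simp only [if_pos hgap, List.length_cons]
      have hne : ¬ ((b :: t).getLastD (-1) = a + ((t.length + 1 : Nat) : Int)) := by
        push_cast
        omega
      exact (decide_eq_false hne).symm
    · have hb : b = a + 1 := by omega
      simp only [if_neg hgap]
      rw [ih b hbt]
      simp only [List.length_cons]
      congr 1
      subst hb
      push_cast
      ring_nf

-- ===== VERDICT (by name: the statement is the Claim_ definition above) =====
theorem has_consecutive_items_py_spec : Claim_equal_has_consecutive_items_py := by
  intro pattern _
  unfold Spec_has_consecutive_items_py has_consecutive_items_py has_consecutive_items_py_alt
  have hstar : ("*" : String).toList = ['*'] := rfl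
  set l := pattern.toList with hl
  rw [pvStars_eq l 0]
  have hcount : PySem.Str.count pattern "*" = (pvPosFrom 0 l).length := by
    rw [PySem.Str.count]
    rw [hstar]
    rw [pvCount_eq, pvPosFrom_length]
  have hfind : PySem.Str.find pattern "*" = (pvPosFrom 0 l).headD (-1) := by
    rw [PySem.Str.find, hstar, PySem.Chars.find]
    exact_mod_cast pvFind_go l 0
  have hrfind : PySem.Str.rfind pattern "*" = (pvPosFrom 0 l).getLastD (-1) := by
    rw [PySem.Str.rfind, hstar, PySem.Chars.rfind, pvRfind_go]
    rw [List.take_of_length_le (by omega)]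
  rw [hcount, hfind, hrfind]
  by_cases hle : (pvPosFrom 0 l).length ≤ 1
  · simp [hle]
  · simp only [if_neg hle]
    obtain ⟨a, rest, hps⟩ : ∃ a rest, pvPosFrom 0 l = a :: rest := by
      cases hps : pvPosFrom 0 l with
      | nil => rw [hps] at hle; simp at hle
      | cons a rest => exact ⟨a, rest, rfl⟩
    rw [hps]
    have hchain : (a :: rest).IsChain (· < ·) := hps ▸ pvPosFrom_chain l 0
    rw [pvGap rest a hchain]
    simp only [List.headD_cons, List.length_cons]
    rw [show ((a :: rest).getLastD (-1) - a + 1 == ((rest.length + 1 : Nat) : Int))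
        = decide ((a :: rest).getLastD (-1) - a + 1 = ((rest.length + 1 : Nat) : Int)) from rfl]
    rw [decide_eq_decide]
    push_cast
    constructor <;> intro <;> omega
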